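-- pv_equiv track=rewrite | github.com/racerandom/JaMIE | utils.py | sbwtok2tok_alignment
-- ===== SOURCE A (Python) =====
-- def sbwtok2tok_alignment(sbw_sent_tok):
--     aligned_ids = []
--     sent_tok = []
--     tok_cache = []
--     curr_index = -1
--     for index, token in enumerate(sbw_sent_tok):
--         if not token.startswith("##"):
--             if tok_cache:
--                 sent_tok.append(' '.join(tok_cache).replace(' ##', ''))
--                 tok_cache = []
--             curr_index += 1
--         tok_cache.append(token)
--         aligned_ids.append(curr_index)
--     if tok_cache:
--         sent_tok.append(' '.join(tok_cache).replace(' ##', ''))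
--     return sent_tok, aligned_ids
-- ===== SOURCE B (Python) =====
-- def sbwtok2tok_alignment(sbw_sent_tok):
--     # pass 1: alignment ids via a counter that increments at each non-'##' token
--     aligned_ids = []
--     idx = -1
--     for t in sbw_sent_tok:
--         if not t.startswith("##"):
--             idx += 1
--         aligned_ids.append(idx)
--     # pass 2: cut the token list into runs of equal alignment id and merge each run
--     sent_tok = []
--     pos = 0
--     n = len(sbw_sent_tok)
--     while pos < n:
--         end = pos + 1
--         while end < n and aligned_ids[end] == aligned_ids[pos]:
--             end += 1
--         sent_tok.append(' '.join(sbw_sent_tok[pos:end]).replace(' ##', ''))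
--         pos = end
--     return sent_tok, aligned_ids
-- ===== Notes on version B (the rewrite author's own statement) =====
-- stated objective: alternative
-- what changed: A merges subwords in one pass with a flush-on-boundary token cache; B first computes the alignment ids with a counter, then cuts the token list into runs of equal id and merges each run with the identical join/replace expression.
import Mathlib
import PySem

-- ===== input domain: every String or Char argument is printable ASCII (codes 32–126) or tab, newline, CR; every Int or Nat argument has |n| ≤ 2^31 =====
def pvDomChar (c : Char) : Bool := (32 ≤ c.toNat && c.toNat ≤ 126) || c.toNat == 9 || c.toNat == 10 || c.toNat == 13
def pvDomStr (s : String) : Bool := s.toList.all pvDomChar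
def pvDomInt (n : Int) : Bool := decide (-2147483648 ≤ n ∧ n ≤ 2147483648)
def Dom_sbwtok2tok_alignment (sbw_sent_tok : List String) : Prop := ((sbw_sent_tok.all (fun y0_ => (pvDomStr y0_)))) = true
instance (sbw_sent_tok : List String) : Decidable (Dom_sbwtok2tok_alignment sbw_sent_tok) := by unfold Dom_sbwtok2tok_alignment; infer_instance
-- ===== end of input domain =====

-- B is an alternative decomposition of A (ids first, then cut tokens into runs of equal id); same cost, return value proved equal on all inputs.

-- the merge expression ' '.join(cache).replace(' ##', ''), shared verbatim by both Pythons
def pvMerge (cache : List String) : String :=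
  PySem.Str.replace (PySem.Str.join " " cache) " ##" ""

-- ===== PORT A =====
-- one loop step of A's for-loop (the enumerate index is unused by A's body)
def pvAStep (st : List Int × List String × List String × Int) (token : String) :
    List Int × List String × List String × Int :=
  let aligned_ids := st.1
  let sent_tok := st.2.1
  let tok_cache := st.2.2.1
  let curr_index := st.2.2.2
  if !(PySem.Str.startswith token "##") then
    let sent_tok := if tok_cache ≠ [] then sent_tok ++ [pvMerge tok_cache] else sent_tok
    let tok_cache : List String := if tok_cache ≠ [] then [] else tok_cache
    let curr_index := curr_index + 1
    (aligned_ids ++ [curr_index], sent_tok, tok_cache ++ [token], curr_index)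
  else
    (aligned_ids ++ [curr_index], sent_tok, tok_cache ++ [token], curr_index)

def sbwtok2tok_alignment (sbw_sent_tok : List String) : List String × List Int :=
  let st := sbw_sent_tok.foldl pvAStep ([], [], [], -1)
  (if st.2.2.1 ≠ [] then st.2.1 ++ [pvMerge st.2.2.1] else st.2.1, st.1)

-- ===== PORT B =====
-- pass 1 of B: alignment ids from a counter that bumps at each non-'##' token
def pvBIds : List String → Int → List Int
  | [], _ => []
  | t :: ts, idx =>
    let idx := if !(PySem.Str.startswith t "##") then idx + 1 else idx
    idx :: pvBIds ts idx

-- pass 2 of B: the while-loop over `pairs`; the inner counting loop k and the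
-- slices pairs[:k] / pairs[k:] are ported as takeWhile / dropWhile on the tail
def pvRuns : List (Int × String) → List String
  | [] => []
  | (i, t) :: rest =>
      pvMerge (t :: (rest.takeWhile (fun p => p.1 == i)).map Prod.snd)
        :: pvRuns (rest.dropWhile (fun p => p.1 == i))
termination_by l => l.length
decreasing_by
  simp
  exact rest.length_dropWhile_le _

def sbwtok2tok_alignment_alt (sbw_sent_tok : List String) : List String × List Int :=
  let aligned_ids := pvBIds sbw_sent_tok (-1)
  (pvRuns (aligned_ids.zip sbw_sent_tok), aligned_ids)

-- ===== PRECONDITION & SPEC =====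
def Spec_sbwtok2tok_alignment (sbw_sent_tok : List String) (out : List String × List Int) : Prop := out = sbwtok2tok_alignment_alt sbw_sent_tok
instance (sbw_sent_tok : List String) (out : List String × List Int) : Decidable (Spec_sbwtok2tok_alignment sbw_sent_tok out) := by unfold Spec_sbwtok2tok_alignment; infer_instance

-- ===== CLAIM (what is proved, stated in full; the proofs are below) =====
def Claim_equal_sbwtok2tok_alignment : Prop := ∀ (sbw_sent_tok : List String), Dom_sbwtok2tok_alignment sbw_sent_tok → Spec_sbwtok2tok_alignment sbw_sent_tok (sbwtok2tok_alignment sbw_sent_tok)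

-- ===== LEMMAS AND PROOFS =====

-- canonical chunked form both ports are reduced to (cache is the open run, nonempty)
def pvCanonSent : List String → List String → List String
  | cache, [] => [pvMerge cache]
  | cache, t :: ts =>
    if PySem.Str.startswith t "##" then pvCanonSent (cache ++ [t]) ts
    else pvMerge cache :: pvCanonSent [t] ts

def pvCanonTop : List String → List String
  | [] => []
  | t :: ts => pvCanonSent [t] ts

-- equation lemmas for the well-founded pvRuns
theorem pvRuns_nil : pvRuns [] = [] := by rw [pvRuns]

theorem pvRuns_cons (i : Int) (t : String) (rest : List (Int × String)) :
    pvRuns ((i, t) :: rest)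
      = pvMerge (t :: (rest.takeWhile (fun p => p.1 == i)).map Prod.snd)
        :: pvRuns (rest.dropWhile (fun p => p.1 == i)) := by rw [pvRuns]

-- A's loop, run from a state with nonempty cache, followed by the final flush
theorem pvA_loop (l : List String) : ∀ (idx : Int) (ids : List Int) (sent cache : List String),
    cache ≠ [] →
    (let st := l.foldl pvAStep (ids, sent, cache, idx)
     ((if st.2.2.1 ≠ [] then st.2.1 ++ [pvMerge st.2.2.1] else st.2.1 : List String), st.1))
      = (sent ++ pvCanonSent cache l, ids ++ pvBIds l idx) := by
  induction l with
  | nil => intro idx ids sent cache h; simp [pvCanonSent, pvBIds, h]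
  | cons t ts ih =>
    intro idx ids sent cache h
    by_cases hsw : PySem.Str.startswith t "##" = true
    · have := ih idx (ids ++ [idx]) sent (cache ++ [t]) (by simp)
      simp only [List.foldl_cons, pvAStep, hsw, Bool.not_true, Bool.false_eq_true, if_false]
      simp only [pvCanonSent, pvBIds, ne_eq, ite_not] at this ⊢
      simp at hsw
      simp [hsw, this]
    · have hsw' : PySem.Str.startswith t "##" = false := by
        cases hb : PySem.Str.startswith t "##" with
        | true => exact absurd hb hsw
        | false => rfl
      have := ih (idx + 1) (ids ++ [idx + 1]) (sent ++ [pvMerge cache]) [t] (by simp)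
      simp only [List.foldl_cons, pvAStep, hsw', Bool.not_false, if_true, h, ne_eq,
        not_false_eq_true, if_pos]
      simp only [pvCanonSent, pvBIds, ne_eq, ite_not] at this ⊢
      simp at hsw'
      simp [hsw', h, this]

theorem pvCanonSent_split (l : List String) : ∀ cache : List String,
    pvCanonSent cache l
      = pvMerge (cache ++ l.takeWhile (fun t => PySem.Str.startswith t "##"))
        :: pvCanonTop (l.dropWhile (fun t => PySem.Str.startswith t "##")) := by
  induction l with
  | nil => intro cache; simp [pvCanonSent, pvCanonTop]
  | cons t ts ih =>
    intro cache
    by_cases hsw : PySem.Str.startswith t "##" = true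
    · have hs := hsw; simp at hs
      simp [pvCanonSent, hs, ih (cache ++ [t]), List.takeWhile_cons, List.dropWhile_cons]
    · have hs : PySem.Str.startswith t "##" = false := by
        cases hb : PySem.Str.startswith t "##" with
        | true => exact absurd hb hsw
        | false => rfl
      simp at hs
      simp [pvCanonSent, hs, pvCanonTop, List.takeWhile_cons, List.dropWhile_cons]

-- pass-1 ids: the run of ids equal to idx is exactly the leading '##' tokens
theorem pvBIds_take (ts : List String) : ∀ idx : Int,
    ((pvBIds ts idx).zip ts).takeWhile (fun p => p.1 == idx)
      = (ts.takeWhile (fun t => PySem.Str.startswith t "##")).map (fun t => (idx, t)) := by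
  induction ts with
  | nil => intro idx; simp [pvBIds]
  | cons t ts ih =>
    intro idx
    by_cases hsw : PySem.Str.startswith t "##" = true
    · have hs := hsw; simp at hs
      simp [pvBIds, hs, List.takeWhile_cons, ih idx]
    · have hs : PySem.Str.startswith t "##" = false := by
        cases hb : PySem.Str.startswith t "##" with
        | true => exact absurd hb hsw
        | false => rfl
      have hne : ((idx + 1 : Int) == idx) = false := by simp
      simp at hs
      simp [pvBIds, hs, hne]

theorem pvBIds_drop (ts : List String) : ∀ idx : Int,
    ((pvBIds ts idx).zip ts).dropWhile (fun p => p.1 == idx)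
      = (pvBIds (ts.dropWhile (fun t => PySem.Str.startswith t "##")) idx).zip
          (ts.dropWhile (fun t => PySem.Str.startswith t "##")) := by
  induction ts with
  | nil => intro idx; simp [pvBIds]
  | cons t ts ih =>
    intro idx
    by_cases hsw : PySem.Str.startswith t "##" = true
    · have hs := hsw; simp at hs
      simp [pvBIds, hs, List.dropWhile_cons, ih idx]
    · have hs : PySem.Str.startswith t "##" = false := by
        cases hb : PySem.Str.startswith t "##" with
        | true => exact absurd hb hsw
        | false => rfl
      have hne : ((idx + 1 : Int) == idx) = false := by simp
      simp at hs
      simp [pvBIds, hs, hne]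

theorem pvRuns_canon (n : ℕ) : ∀ (l : List String), l.length ≤ n → ∀ idx : Int,
    pvRuns ((pvBIds l idx).zip l) = pvCanonTop l := by
  induction n with
  | zero =>
    intro l hl idx
    have hnil : l = [] := List.length_eq_zero_iff.mp (Nat.le_zero.mp hl)
    simp [hnil, pvBIds, pvRuns_nil, pvCanonTop]
  | succ n ih =>
    intro l hl idx
    cases l with
    | nil => simp [pvBIds, pvRuns_nil, pvCanonTop]
    | cons t ts =>
      set i := if !(PySem.Str.startswith t "##") then idx + 1 else idx with hi
      have hz : (pvBIds (t :: ts) idx).zip (t :: ts) = (i, t) :: (pvBIds ts i).zip ts := by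
        simp [pvBIds, hi]
      have hlen : (ts.dropWhile (fun t => PySem.Str.startswith t "##")).length ≤ n := by
        have := ts.length_dropWhile_le (fun t => PySem.Str.startswith t "##")
        simp at hl; omega
      rw [hz, pvRuns_cons, pvBIds_take, pvBIds_drop, ih _ hlen i, pvCanonTop,
        pvCanonSent_split]
      simp

-- ===== VERDICT (by name: the statement is the Claim_ definition above) =====
theorem sbwtok2tok_alignment_spec : Claim_equal_sbwtok2tok_alignment := by
  intro l _
  unfold Spec_sbwtok2tok_alignment sbwtok2tok_alignment sbwtok2tok_alignment_alt
  cases l with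
  | nil => simp [pvBIds, pvRuns_nil]
  | cons t ts =>
    show _ = (pvRuns ((pvBIds (t :: ts) (-1)).zip (t :: ts)), pvBIds (t :: ts) (-1))
    rw [pvRuns_canon (t :: ts).length _ le_rfl]
    by_cases hsw : PySem.Str.startswith t "##" = true
    · have := pvA_loop ts (-1) [(-1)] [] [t] (by simp)
      simp only [List.foldl_cons, pvAStep, hsw, Bool.not_true, Bool.false_eq_true, if_false]
        at this ⊢
      simp only [pvCanonTop, pvBIds, ne_eq, ite_not] at this ⊢
      simp at hsw
      simp [hsw, this]
    · have hsw' : PySem.Str.startswith t "##" = false := by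
        cases hb : PySem.Str.startswith t "##" with
        | true => exact absurd hb hsw
        | false => rfl
      have := pvA_loop ts 0 [0] [] [t] (by simp)
      simp only [List.foldl_cons, pvAStep, hsw', Bool.not_false, if_true] at this ⊢
      simp only [pvCanonTop, pvBIds, ne_eq, ite_not] at this ⊢
      simp at hsw'
      simp [hsw', this]
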